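-- pv_equiv track=rewrite | github.com/bhatt40/advent-of-code | 2020/day-16/day-16.py | get_possible_fields
-- ===== SOURCE A (Python) =====
-- def get_possible_fields(values, rules):
--     fields = set()
--     for field, ranges in rules.items():
--         if all([
--             any([
--                 value >= range[0] and value <= range[1]
--                 for range in ranges
--             ])
--             for value in values
--         ]):
--             fields.add(field)
--
--     return fields
-- ===== SOURCE B (Python) =====
-- def get_possible_fields(values, rules):
--     # Recursive, back-to-front over the field list: a field survives unless some
--     # value escapes ALL of its ranges (negated test, looked for with any/all).
--     def go(fields):
--         if not fields:
--             return set()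
--         f, rest = fields[0], fields[1:]
--         acc = go(rest)
--         if not any(all(v < lo or hi < v for lo, hi in rules[f]) for v in values):
--             acc.add(f)
--         return acc
--     return go(list(rules))
-- ===== Notes on version B (the rewrite author's own statement) =====
-- stated objective: alternative
-- what changed: Replaced A's accumulating foldl over fields with the all/any covered test on fully materialized inner list comprehensions by a structural recursion over the field list built back-to-front using the De Morgan-dual escape test (any value escaping all ranges) with short-circuiting generators.
import Mathlib
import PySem

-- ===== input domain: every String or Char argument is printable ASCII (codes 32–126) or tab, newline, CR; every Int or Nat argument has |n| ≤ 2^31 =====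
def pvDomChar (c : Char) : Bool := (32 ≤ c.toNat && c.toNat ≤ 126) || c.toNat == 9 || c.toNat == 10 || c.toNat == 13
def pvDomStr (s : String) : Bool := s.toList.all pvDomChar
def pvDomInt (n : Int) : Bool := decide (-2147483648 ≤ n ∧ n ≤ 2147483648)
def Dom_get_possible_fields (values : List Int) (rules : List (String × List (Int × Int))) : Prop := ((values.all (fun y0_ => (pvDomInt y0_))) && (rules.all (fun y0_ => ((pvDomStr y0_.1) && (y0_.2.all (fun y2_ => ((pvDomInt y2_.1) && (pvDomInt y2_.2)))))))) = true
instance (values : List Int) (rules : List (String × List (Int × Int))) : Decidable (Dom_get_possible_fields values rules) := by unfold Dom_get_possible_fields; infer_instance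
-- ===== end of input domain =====

-- B is an alternative decomposition (same cost): a back-to-front structural recursion
-- over the fields with the De Morgan-dual escape test, instead of A's accumulating loop.

-- ===== PORT A =====
-- A: per field (dict iteration order), add it to the set iff every value is covered by some range.
def get_possible_fields (values : List Int) (rules : List (String × List (Int × Int))) : List String :=
  (PySem.Dict.ofList rules).items.foldl
    (fun fields fr =>
      if values.all (fun value =>
            fr.2.any (fun r => decide (value ≥ r.1) && decide (value ≤ r.2)))
      then PySem.Set.add fields fr.1 else fields)
    PySem.Set.empty

-- ===== PORT B =====
-- B's recursion: drop a field iff some value escapes all its ranges; else add it to the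
-- recursive result (its keys are distinct and a Python set is unordered, so the fresh
-- element is consed in front).
def pvGoB (values : List Int) (d : PySem.Dict String (List (Int × Int))) :
    List String → List String
  | [] => []
  | f :: rest =>
    let acc := pvGoB values d rest
    if values.any (fun v => (d.getD f []).all (fun r => decide (v < r.1) || decide (r.2 < v)))
    then acc
    else f :: acc

def get_possible_fields_alt (values : List Int) (rules : List (String × List (Int × Int))) : List String :=
  let d := PySem.Dict.ofList rules
  pvGoB values d d.keys

-- ===== PRECONDITION & SPEC =====
def Spec_get_possible_fields (values : List Int) (rules : List (String × List (Int × Int))) (out : List String) : Prop := out = get_possible_fields_alt values rules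
instance (values : List Int) (rules : List (String × List (Int × Int))) (out : List String) : Decidable (Spec_get_possible_fields values rules out) := by unfold Spec_get_possible_fields; infer_instance

-- ===== CLAIM (what is proved, stated in full; the proofs are below) =====
def Claim_equal_get_possible_fields : Prop := ∀ (values : List Int) (rules : List (String × List (Int × Int))), Dom_get_possible_fields values rules → Spec_get_possible_fields values rules (get_possible_fields values rules)

-- ===== LEMMAS AND PROOFS =====

-- A's loop over items with Set.add on nodup fresh keys is a filter-then-project.
lemma foldA {ν : Type} (P : (String × ν) → Bool) :
    ∀ (items : List (String × ν)) (s : List String),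
      (∀ it ∈ items, it.1 ∉ s) → (items.map Prod.fst).Nodup →
      items.foldl (fun s it => if P it then PySem.Set.add s it.1 else s) s
        = s ++ (items.filter P).map Prod.fst := by
  intro items
  induction items with
  | nil => intro s _ _; simp
  | cons it tl ih =>
    intro s hfresh hnd
    simp only [List.map_cons, List.nodup_cons, List.mem_map] at hnd
    have hfr : it.1 ∉ s := hfresh it (by simp)
    have htl : ∀ j ∈ tl, j.1 ∉ PySem.Set.add s it.1 := by
      intro j hj
      have h1 : j.1 ∉ s := hfresh j (by simp [hj])
      have h2 : j.1 ≠ it.1 := by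
        intro h; exact hnd.1 ⟨j, hj, h⟩
      simp [PySem.Set.mem_add, h1, h2]
    by_cases hP : P it
    · simp only [List.foldl_cons, hP, if_pos]
      rw [ih _ htl hnd.2]
      have : PySem.Set.add s it.1 = s ++ [it.1] := by
        simp [PySem.Set.add, PySem.Set.contains_eq_listContains]
        intro h; exact absurd h hfr
      rw [this]
      simp [hP]
    · simp only [List.foldl_cons, hP, if_neg, Bool.false_eq_true, not_false_iff]
      rw [ih _ (fun j hj => hfresh j (by simp [hj])) hnd.2]
      simp [hP]

-- Pointwise De Morgan: "escapes every range" is the negation of "covered by some range".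
lemma escape_one (v : Int) (ranges : List (Int × Int)) :
    ranges.all (fun r => decide (v < r.1) || decide (r.2 < v))
      = ! ranges.any (fun r => decide (v ≥ r.1) && decide (v ≤ r.2)) := by
  induction ranges with
  | nil => simp
  | cons r rs ih =>
    simp only [List.all_cons, List.any_cons, Bool.not_or, ih]
    congr 1
    rw [Bool.eq_iff_iff]
    simp


-- De Morgan: "some value escapes all ranges" is the negation of "all values are covered".
lemma escape_eq_not_covered (values : List Int) (ranges : List (Int × Int)) :
    values.any (fun v => ranges.all (fun r => decide (v < r.1) || decide (r.2 < v)))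
      = ! values.all (fun v => ranges.any (fun r => decide (v ≥ r.1) && decide (v ≤ r.2))) := by
  simp only [escape_one]
  rw [List.any_eq_not_all_not]
  simp

-- B's recursion over the keys equals the filter-projection of the items.
lemma goB_eq_filter (values : List Int) (d : PySem.Dict String (List (Int × Int))) :
    ∀ (items : List (String × List (Int × Int))),
      (∀ it ∈ items, d.getD it.1 [] = it.2) →
      pvGoB values d (items.map Prod.fst)
        = (items.filter (fun fr => values.all (fun v =>
            fr.2.any (fun r => decide (v ≥ r.1) && decide (v ≤ r.2))))).map Prod.fst := by
  intro items
  induction items with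
  | nil => intro _; simp [pvGoB]
  | cons it tl ih =>
    intro h
    have hit : d.getD it.1 [] = it.2 := h it (by simp)
    simp only [List.map_cons, pvGoB, hit, escape_eq_not_covered]
    rw [ih (fun j hj => h j (by simp [hj]))]
    by_cases hP : values.all (fun v => it.2.any (fun r => decide (v ≥ r.1) && decide (v ≤ r.2))) = true
    · simp [hP]
    · simp [hP]

-- ===== VERDICT (by name: the statement is the Claim_ definition above) =====
theorem get_possible_fields_spec : Claim_equal_get_possible_fields := by
  intro values rules _
  unfold Spec_get_possible_fields
  have hnd : (PySem.Dict.ofList rules).keys.Nodup := PySem.Dict.nodup_keys_ofList rules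
  have hkeys : (PySem.Dict.ofList rules).keys
      = (PySem.Dict.ofList rules).items.map Prod.fst := rfl
  show (PySem.Dict.ofList rules).items.foldl
      (fun fields fr =>
        if values.all (fun value =>
              fr.2.any (fun r => decide (value ≥ r.1) && decide (value ≤ r.2)))
        then PySem.Set.add fields fr.1 else fields)
      PySem.Set.empty
    = pvGoB values (PySem.Dict.ofList rules) (PySem.Dict.ofList rules).keys
  rw [foldA _ _ PySem.Set.empty (by simp [PySem.Set.empty]) (hkeys ▸ hnd)]
  rw [hkeys, goB_eq_filter values (PySem.Dict.ofList rules) (PySem.Dict.ofList rules).items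
    (fun it hit => PySem.Dict.getD_of_mem_items (PySem.Dict.ofList rules) hit hnd [])]
  simp [PySem.Set.empty]
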